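-- pv_equiv track=rewrite | github.com/MyNameIsDotPy/Intro-Sistemas-Inteligentes | genetic_algorithms/main.py | adapt
-- ===== SOURCE A (Python) =====
-- def adapt(states, writes, inputs):
--     output = []
--     start = 0
--     for i in range(len(inputs)):
--         output.append(writes[start][inputs[i]])
--         start = states[start][inputs[i]]
--     c = 0
--     for i in range(len(inputs) - 1):
--         if output[i] == inputs[i + 1]:
--             c += 1
--     return c
-- ===== SOURCE B (Python) =====
-- def adapt(states, writes, inputs):
--     c = 0
--     start = 0
--     prev = None
--     for x in inputs:
--         if prev is not None and prev == x:
--             c += 1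
--         prev = writes[start][x]
--         start = states[start][x]
--     return c
-- ===== Notes on version B (the rewrite author's own statement) =====
-- stated objective: alternative
-- what changed: single fused pass that keeps only the previous output symbol as a scalar and counts matches on the fly, instead of building the full output list and re-scanning it by index in a second loop
import Mathlib
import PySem

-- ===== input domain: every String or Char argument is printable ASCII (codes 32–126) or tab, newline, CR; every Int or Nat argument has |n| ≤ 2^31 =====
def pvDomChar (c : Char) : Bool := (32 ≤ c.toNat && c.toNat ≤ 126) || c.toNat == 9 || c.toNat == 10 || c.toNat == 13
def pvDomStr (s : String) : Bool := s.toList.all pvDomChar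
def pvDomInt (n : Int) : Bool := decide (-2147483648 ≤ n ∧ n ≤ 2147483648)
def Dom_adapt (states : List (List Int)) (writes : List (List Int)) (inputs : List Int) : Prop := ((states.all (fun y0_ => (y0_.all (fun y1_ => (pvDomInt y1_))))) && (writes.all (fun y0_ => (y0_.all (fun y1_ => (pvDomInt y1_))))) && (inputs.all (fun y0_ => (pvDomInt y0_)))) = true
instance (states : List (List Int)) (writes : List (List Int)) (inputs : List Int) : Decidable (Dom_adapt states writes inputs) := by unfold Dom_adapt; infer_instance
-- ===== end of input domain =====

-- B fuses A's two passes into one, keeping only the previous output symbol as a scalar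
-- instead of building the whole output list and re-scanning it by index (alternative decomposition).


-- ===== PORT A =====
-- first loop: build output list and thread start; second loop: count output[i] == inputs[i+1]
def adapt (states : List (List Int)) (writes : List (List Int)) (inputs : List Int) : Int :=
  let r := inputs.foldl
    (fun (acc : List Int × Int) x =>
      (acc.1 ++ [PySem.List.pyGetD (PySem.List.pyGetD writes acc.2 []) x 0],
       PySem.List.pyGetD (PySem.List.pyGetD states acc.2 []) x 0))
    ([], 0)
  (PySem.List.pyRange 0 ((inputs.length : Int) - 1) 1).foldl
    (fun c i =>
      if PySem.List.pyGetD r.1 i 0 = PySem.List.pyGetD inputs (i + 1) 0 then c + 1 else c)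
    0

-- ===== PORT B =====
-- single pass: state (start, prev output as Option, counter)
def adapt_alt (states : List (List Int)) (writes : List (List Int)) (inputs : List Int) : Int :=
  (inputs.foldl
    (fun (acc : Int × Option Int × Int) x =>
      (PySem.List.pyGetD (PySem.List.pyGetD states acc.1 []) x 0,
       some (PySem.List.pyGetD (PySem.List.pyGetD writes acc.1 []) x 0),
       if acc.2.1 = some x then acc.2.2 + 1 else acc.2.2))
    (0, none, 0)).2.2

-- ===== PRECONDITION & SPEC =====
-- step-by-step validity of the run A performs: every lookup made at each step succeeds
def runOK (states writes : List (List Int)) : Int → List Int → Bool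
  | _, [] => true
  | st, x :: xs =>
      match PySem.List.pyGet? writes st with
      | none => false
      | some wrow =>
        match PySem.List.pyGet? wrow x with
        | none => false
        | some _ =>
          match PySem.List.pyGet? states st with
          | none => false
          | some srow =>
            match PySem.List.pyGet? srow x with
            | none => false
            | some nxt => runOK states writes nxt xs

-- Pre_ excludes EXACTLY the inputs on which the Python A raises IndexError (some step of the run
-- indexes outside the current writes/states row or outside the tables); it excludes no input on
-- which A returns a value.
def Pre_adapt (states : List (List Int)) (writes : List (List Int)) (inputs : List Int) : Prop :=
  runOK states writes 0 inputs = true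
instance (states : List (List Int)) (writes : List (List Int)) (inputs : List Int) : Decidable (Pre_adapt states writes inputs) := by unfold Pre_adapt; infer_instance

def pvWitness_adapt : List (List Int) × List (List Int) × List Int := ([[0, 1], [1, 0]], [[1, 0], [0, 1]], [0, 1, 1, 0])

def Spec_adapt (states : List (List Int)) (writes : List (List Int)) (inputs : List Int) (out : Int) : Prop := out = adapt_alt states writes inputs
instance (states : List (List Int)) (writes : List (List Int)) (inputs : List Int) (out : Int) : Decidable (Spec_adapt states writes inputs out) := by unfold Spec_adapt; infer_instance

-- ===== CLAIM (what is proved, stated in full; the proofs are below) =====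
def Claim_equal_adapt : Prop := ∀ (states : List (List Int)) (writes : List (List Int)) (inputs : List Int), Dom_adapt states writes inputs → Pre_adapt states writes inputs → Spec_adapt states writes inputs (adapt states writes inputs)

-- ===== LEMMAS AND PROOFS =====

-- the list of output symbols A's first loop produces, as a structural recursion
def simO (states writes : List (List Int)) : Int → List Int → List Int
  | _, [] => []
  | st, x :: xs =>
      PySem.List.pyGetD (PySem.List.pyGetD writes st []) x 0 ::
        simO states writes (PySem.List.pyGetD (PySem.List.pyGetD states st []) x 0) xs

-- matches between corresponding positions of two lists (stops at the shorter one)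
def countZ : List Int → List Int → Int
  | p :: ps, x :: xs => (if p = x then 1 else 0) + countZ ps xs
  | _, _ => 0

theorem length_simO (states writes : List (List Int)) (xs : List Int) :
    ∀ st, (simO states writes st xs).length = xs.length := by
  induction xs with
  | nil => intro st; rfl
  | cons x xs ih => intro st; simp [simO, ih]

theorem fold1_fst (states writes : List (List Int)) (xs : List Int) :
    ∀ (acc : List Int) (st : Int),
      (xs.foldl
        (fun (acc : List Int × Int) x =>
          (acc.1 ++ [PySem.List.pyGetD (PySem.List.pyGetD writes acc.2 []) x 0],
           PySem.List.pyGetD (PySem.List.pyGetD states acc.2 []) x 0))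
        (acc, st)).1 = acc ++ simO states writes st xs := by
  induction xs with
  | nil => intro acc st; simp [simO]
  | cons x xs ih => intro acc st; simp [List.foldl_cons, simO, ih, List.append_assoc]

theorem foldB_eq (states writes : List (List Int)) (xs : List Int) :
    ∀ (st : Int) (prev : Int) (c : Int),
      (xs.foldl
        (fun (acc : Int × Option Int × Int) x =>
          (PySem.List.pyGetD (PySem.List.pyGetD states acc.1 []) x 0,
           some (PySem.List.pyGetD (PySem.List.pyGetD writes acc.1 []) x 0),
           if acc.2.1 = some x then acc.2.2 + 1 else acc.2.2))
        (st, some prev, c)).2.2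
      = c + countZ (prev :: simO states writes st xs) xs := by
  induction xs with
  | nil => intro st prev c; simp [countZ]
  | cons x xs ih =>
      intro st prev c
      rw [List.foldl_cons, ih]
      simp only [simO, countZ, Option.some.injEq]
      split_ifs with h <;> omega

theorem rangeCount (out inp : List Int) (hlen : out.length = inp.length) :
    ∀ (m k : Nat) (c0 : Int), k + m + 1 = inp.length →
      (PySem.List.pyRange (k : Int) ((inp.length : Int) - 1) 1).foldl
        (fun c i =>
          if PySem.List.pyGetD out i 0 = PySem.List.pyGetD inp (i + 1) 0 then c + 1 else c)
        c0
      = c0 + countZ (out.drop k) (inp.drop (k + 1)) := by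
  intro m
  induction m with
  | zero =>
      intro k c0 hk
      rw [PySem.List.pyRange_one_eq_nil (by omega)]
      have h1 : inp.drop (k + 1) = [] := List.drop_eq_nil_of_le (by omega)
      simp [h1, countZ]
  | succ m ih =>
      intro k c0 hk
      rw [PySem.List.pyRange_one_cons (by omega : (k : Int) < (inp.length : Int) - 1)]
      rw [List.foldl_cons]
      have hcast : ((k : Int) + 1) = ((k + 1 : Nat) : Int) := by push_cast; ring
      rw [hcast, ih (k + 1) _ (by omega)]
      have hko : k < out.length := by omega
      have hki : k + 1 < inp.length := by omega
      have ho : out.drop k = out[k] :: out.drop (k + 1) := List.drop_eq_getElem_cons hko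
      have hi : inp.drop (k + 1) = inp[k + 1] :: inp.drop (k + 1 + 1) := List.drop_eq_getElem_cons hki
      have hgo : PySem.List.pyGetD out (k : Int) 0 = out[k] := by
        rw [PySem.List.pyGetD_natCast]; exact List.getD_eq_getElem _ _ hko
      have hgi : PySem.List.pyGetD inp ((k + 1 : Nat) : Int) 0 = inp[k + 1] := by
        rw [PySem.List.pyGetD_natCast]; exact List.getD_eq_getElem _ _ hki
      rw [ho, hi]
      simp only [countZ]
      rw [hgo, hgi]
      split_ifs with h <;> omega

theorem adapt_eq_alt (states writes : List (List Int)) (inputs : List Int) :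
    adapt states writes inputs = adapt_alt states writes inputs := by
  cases inputs with
  | nil => rfl
  | cons x xs =>
      have hB : adapt_alt states writes (x :: xs)
          = countZ (simO states writes 0 (x :: xs)) xs := by
        simp only [adapt_alt, List.foldl_cons]
        rw [foldB_eq]
        simp [simO]
      have hA : adapt states writes (x :: xs)
          = countZ (simO states writes 0 (x :: xs)) xs := by
        simp only [adapt]
        simp only [fold1_fst, List.nil_append]
        have hlen : (simO states writes 0 (x :: xs)).length = (x :: xs).length :=
          length_simO states writes (x :: xs) 0
        have h := rangeCount (simO states writes 0 (x :: xs)) (x :: xs) hlen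
          xs.length 0 0 (by simp)
        simp only [Nat.cast_zero] at h
        rw [h]
        simp
      rw [hA, hB]

-- ===== VERDICT (by name: the statement is the Claim_ definition above) =====
theorem adapt_spec : Claim_equal_adapt := by
  intro states writes inputs _ _
  unfold Spec_adapt
  exact adapt_eq_alt states writes inputs
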